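-- pv_equiv track=rewrite | github.com/nehaparveen17/SYM_final_project | backend/Split_word.py | word_split
-- ===== SOURCE A (Python) =====
-- def word_split(word:str):
--
--     word_with_e = False
--     temp_letter = ''
--     adj_letter = ""
--     full_split_word = []
--
--     # Define vowels and diphthongs
--     vowels = 'aeiouy'
--     diphthongs = ['ai', 'au', 'ay', 'ea', 'ee', 'ei', 'ey', 'oa', 'oe', 'oi', 'ou', 'oy', 'ae']
--
--     # Define digraphs (consonant pairs that make only one sound)
--     digraphs = ['ch', 'sh', 'ph', 'th', 'wh', 'gh']
--
--     # Define exceptions for two vowels making one sound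
--     one_sound_exceptions = ['oa', 'oe', 'oo', 'ou', 'ei', 'ie', 'ay', 'ey']
--
-- #     # Flag to keep track of whether we're in a diphthong
-- #     in_diphthong = False
--
--     # Remove trailing silent 'e'
--     if word.endswith('e'):
--         word = word[:-1]
--         word_with_e = True
--
--     length_of_word = len(word)
--     index = 0
--
--     while index < length_of_word:
--             if word[index].lower() in vowels.lower():
--                 try:
--                     temp_letter = word[index] + word [index+1]
--                     if (temp_letter.lower() in diphthongs) or (temp_letter.lower() in one_sound_exceptions):
--                         adj_letter = temp_letter
--                         full_split_word.append(adj_letter)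
--                         index+=2
--                     else:
--                         full_split_word.append(word[index])
--                         index+=1
--                 except IndexError:
--                     full_split_word.append(word[index])
--                     index+=1
--                     #   break
--
--             else:
--                 try:
--                     temp_letter = word[index] + word [index+1]
--                     if temp_letter.lower() in digraphs:
--                         adj_letter = temp_letter
--                         full_split_word.append(adj_letter)
--                         index+=2
--                     else:
--                         full_split_word.append(word[index])
--                         index+=1
--                 except IndexError:
--                     full_split_word.append(word[index])
--                     index+=1
--                     #   break
--
--     if word_with_e is True:
--         full_split_word.append('e')
--         word_with_e = False
--     return full_split_word
-- ===== SOURCE B (Python) =====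
-- import re
--
-- # All two-char chunks A ever emits: diphthongs + one_sound_exceptions (vowel-first)
-- # and digraphs (consonant-first); the tables are disjoint by first character, so a
-- # single alternation (two-char alternatives before the single-char catch-all)
-- # reproduces A's dispatch.
-- _PAIRS = ['ai', 'au', 'ay', 'ea', 'ee', 'ei', 'ey', 'oa', 'oe', 'oi', 'ou', 'oy',
--           'ae', 'oo', 'ie', 'ch', 'sh', 'ph', 'th', 'wh', 'gh']
-- _CHUNK = re.compile('|'.join(_PAIRS) + '|.', re.IGNORECASE | re.DOTALL)
--
--
-- def word_split(word: str):
--     silent_e = word.endswith('e')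
--     if silent_e:
--         word = word[:-1]
--     chunks = _CHUNK.findall(word)
--     if silent_e:
--         chunks.append('e')
--     return chunks
-- ===== Notes on version B (the rewrite author's own statement) =====
-- stated objective: idiomatic
-- what changed: Replaces A's index-driven while loop with vowel/consonant dispatch over three tables and try/except IndexError by one precompiled case-insensitive regex (all two-char chunks | '.') applied with findall after the same trailing-'e' strip; the pair tables are disjoint by first character, so one alternation suffices.
import Mathlib
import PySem

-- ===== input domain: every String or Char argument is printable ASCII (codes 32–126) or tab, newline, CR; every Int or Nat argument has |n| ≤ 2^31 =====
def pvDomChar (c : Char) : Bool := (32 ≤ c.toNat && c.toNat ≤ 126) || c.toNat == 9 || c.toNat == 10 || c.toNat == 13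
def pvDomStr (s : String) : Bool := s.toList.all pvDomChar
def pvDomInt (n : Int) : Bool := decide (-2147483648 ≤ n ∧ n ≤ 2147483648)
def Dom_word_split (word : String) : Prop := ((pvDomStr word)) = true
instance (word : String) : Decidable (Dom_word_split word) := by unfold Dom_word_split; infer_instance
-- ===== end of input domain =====

-- B replaces A's vowel/consonant dispatch with one regex alternation (all two-char
-- chunks first, then a single-char catch-all), applied by findall after the same
-- trailing-'e' stripping; same return value, more idiomatic.

-- ===== PORT A =====
-- vowels = 'aeiouy'
def wsVowels : List Char := ['a', 'e', 'i', 'o', 'u', 'y']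
-- diphthongs (list of 2-char strings, as lists of chars)
def wsDiph : List (List Char) :=
  [['a','i'], ['a','u'], ['a','y'], ['e','a'], ['e','e'], ['e','i'], ['e','y'],
   ['o','a'], ['o','e'], ['o','i'], ['o','u'], ['o','y'], ['a','e']]
-- digraphs
def wsDig : List (List Char) :=
  [['c','h'], ['s','h'], ['p','h'], ['t','h'], ['w','h'], ['g','h']]
-- one_sound_exceptions
def wsExc : List (List Char) :=
  [['o','a'], ['o','e'], ['o','o'], ['o','u'], ['e','i'], ['i','e'], ['a','y'], ['e','y']]

-- the while loop of A over index; `word[index+1]` raising IndexError is the `none`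
-- case of `w[i+1]?` (the index is a nonnegative in-bounds-or-IndexError access)
def wsLoopA (w : List Char) (i : Nat) : List String :=
  if h : i < w.length then
    let c := w[i]
    -- word[index].lower() in vowels.lower()  ('in' on a one-char string = membership)
    if PySem.Chars.isIn (PySem.Chars.lower [c]) (PySem.Chars.lower wsVowels) then
      match w[i+1]? with
      | some d =>
        -- temp_letter = word[index] + word[index+1]
        if PySem.Chars.lower [c, d] ∈ wsDiph ∨ PySem.Chars.lower [c, d] ∈ wsExc then
          String.ofList [c, d] :: wsLoopA w (i + 2)
        else
          String.ofList [c] :: wsLoopA w (i + 1)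
      | none => String.ofList [c] :: wsLoopA w (i + 1)    -- except IndexError
    else
      match w[i+1]? with
      | some d =>
        if PySem.Chars.lower [c, d] ∈ wsDig then
          String.ofList [c, d] :: wsLoopA w (i + 2)
        else
          String.ofList [c] :: wsLoopA w (i + 1)
      | none => String.ofList [c] :: wsLoopA w (i + 1)    -- except IndexError
  else []
termination_by w.length - i

def word_split (word : String) : List String :=
  let w0 := word.toList
  -- if word.endswith('e'): word = word[:-1]; word_with_e = True
  let wordWithE := PySem.Chars.endswith w0 ['e']
  let w := if wordWithE then PySem.List.slice w0 none (some (-1)) else w0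
  let fullSplitWord := wsLoopA w 0
  if wordWithE then fullSplitWord ++ ["e"] else fullSplitWord

-- ===== PORT B =====
-- _PAIRS: the literal alternation of diphthongs + one_sound_exceptions + digraphs
def wsPairs : List (List Char) :=
  [['a','i'], ['a','u'], ['a','y'], ['e','a'], ['e','e'], ['e','i'], ['e','y'],
   ['o','a'], ['o','e'], ['o','i'], ['o','u'], ['o','y'], ['a','e'],
   ['o','o'], ['i','e'], ['c','h'], ['s','h'], ['p','h'], ['t','h'], ['w','h'], ['g','h']]

-- _CHUNK.findall(word): at each position the regex engine first tries a (case-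
-- insensitive) two-char alternative, else the DOTALL '.' consumes one char;
-- ported step for step as this left-to-right scan
def wsFindall (w : List Char) : List String :=
  match w with
  | [] => []
  | [c] => [String.ofList [c]]
  | c :: d :: rest =>
    if PySem.Chars.lower [c, d] ∈ wsPairs then
      String.ofList [c, d] :: wsFindall rest
    else
      String.ofList [c] :: wsFindall (d :: rest)

def word_split_alt (word : String) : List String :=
  let w0 := word.toList
  let silentE := PySem.Chars.endswith w0 ['e']
  let w := if silentE then PySem.List.slice w0 none (some (-1)) else w0
  let chunks := wsFindall w
  if silentE then chunks ++ ["e"] else chunks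

-- ===== PRECONDITION & SPEC =====
def Spec_word_split (word : String) (out : List String) : Prop := out = word_split_alt word
instance (word : String) (out : List String) : Decidable (Spec_word_split word out) := by unfold Spec_word_split; infer_instance

-- ===== CLAIM (what is proved, stated in full; the proofs are below) =====
def Claim_equal_word_split : Prop := ∀ (word : String), Dom_word_split word → Spec_word_split word (word_split word)

-- ===== LEMMAS AND PROOFS =====

-- the one-char-string membership test of A is char membership
lemma ws_isIn_singleton (x : Char) (l : List Char) :
    PySem.Chars.isIn [x] l = l.contains x := by
  rw [Bool.eq_iff_iff, PySem.Chars.isIn_iff_infix, List.contains_iff_mem]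
  exact List.singleton_infix_iff x l

-- the pair tables are disjoint by their first character: for a vowel first char
-- the combined table behaves as diphthongs ∪ exceptions …
lemma ws_pairs_vowel (x y : Char) (hx : x ∈ wsVowels) :
    ([x, y] ∈ wsPairs) ↔ ([x, y] ∈ wsDiph ∨ [x, y] ∈ wsExc) := by
  simp only [wsVowels, List.mem_cons, List.not_mem_nil, or_false] at hx
  rcases hx with h | h | h | h | h | h <;> subst h <;>
    simp [wsPairs, wsDiph, wsExc] <;> tauto

-- … and for a non-vowel first char as the digraph table
lemma ws_pairs_consonant (x y : Char) (hx : x ∉ wsVowels) :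
    ([x, y] ∈ wsPairs) ↔ ([x, y] ∈ wsDig) := by
  simp only [wsVowels, List.mem_cons, List.not_mem_nil, or_false, not_or] at hx
  obtain ⟨h1, h2, h3, h4, h5, h6⟩ := hx
  simp [wsPairs, wsDig, h1, h2, h3, h4]

-- A's indexed while loop computes B's scan of the remaining suffix
lemma wsLoopA_eq_findall (w : List Char) (i : Nat) :
    wsLoopA w i = wsFindall (w.drop i) := by
  by_cases h : i < w.length
  · have hdrop : w.drop i = w[i] :: w.drop (i + 1) := List.drop_eq_getElem_cons h
    have hvow : PySem.Chars.isIn (PySem.Chars.lower [w[i]]) (PySem.Chars.lower wsVowels)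
        = wsVowels.contains (PySem.Chars.lowerChar w[i]) := by
      rw [show PySem.Chars.lower [w[i]] = [PySem.Chars.lowerChar w[i]] from rfl,
          ws_isIn_singleton]
      -- lowering the all-lowercase vowel table is the identity
      rfl
    by_cases h1 : i + 1 < w.length
    · have hd : w[i+1]? = some w[i+1] := List.getElem?_eq_getElem h1
      have hdrop1 : w.drop (i + 1) = w[i+1] :: w.drop (i + 2) := List.drop_eq_getElem_cons h1
      have ih2 := wsLoopA_eq_findall w (i + 2)
      have ih1 := wsLoopA_eq_findall w (i + 1)
      rw [wsLoopA, dif_pos h, hd, hdrop, hdrop1, wsFindall]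
      by_cases hv : PySem.Chars.lowerChar w[i] ∈ wsVowels
      · have hmem : ([PySem.Chars.lowerChar w[i], PySem.Chars.lowerChar w[i+1]] ∈ wsPairs)
            ↔ ([PySem.Chars.lowerChar w[i], PySem.Chars.lowerChar w[i+1]] ∈ wsDiph
               ∨ [PySem.Chars.lowerChar w[i], PySem.Chars.lowerChar w[i+1]] ∈ wsExc) :=
          ws_pairs_vowel _ _ hv
        simp only [hvow, List.contains_iff_mem, hv, if_true]
        by_cases hp : PySem.Chars.lower [w[i], w[i+1]] ∈ wsPairs
        · rw [if_pos hp, if_pos (by simpa [PySem.Chars.lower] using hmem.mp (by simpa [PySem.Chars.lower] using hp)), ih2]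
        · rw [if_neg hp, if_neg (by
            intro hc
            exact hp (by simpa [PySem.Chars.lower] using hmem.mpr (by simpa [PySem.Chars.lower] using hc))),
            ih1, hdrop1]
      · have hmem : ([PySem.Chars.lowerChar w[i], PySem.Chars.lowerChar w[i+1]] ∈ wsPairs)
            ↔ ([PySem.Chars.lowerChar w[i], PySem.Chars.lowerChar w[i+1]] ∈ wsDig) :=
          ws_pairs_consonant _ _ hv
        simp only [hvow, List.contains_iff_mem, hv, if_false]
        by_cases hp : PySem.Chars.lower [w[i], w[i+1]] ∈ wsPairs
        · rw [if_pos (by simpa [PySem.Chars.lower] using hmem.mp (by simpa [PySem.Chars.lower] using hp)),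
             if_pos hp, ih2]
        · rw [if_neg (by
            intro hc
            exact hp (by simpa [PySem.Chars.lower] using hmem.mpr (by simpa [PySem.Chars.lower] using hc))),
            if_neg hp, ih1, hdrop1]
    · have hd : w[i+1]? = none := List.getElem?_eq_none (by omega)
      have hdrop1 : w.drop (i + 1) = [] := List.drop_eq_nil_of_le (by omega)
      have hone : w.drop i = [w[i]] := by rw [hdrop, hdrop1]
      have hnil : wsLoopA w (i + 1) = [] := by rw [wsLoopA, dif_neg (by omega)]
      rw [wsLoopA, dif_pos h, hd, hone, wsFindall, hnil]
      split <;> simp_all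
  · rw [wsLoopA, dif_neg h, List.drop_eq_nil_of_le (by omega), wsFindall]
termination_by w.length - i

-- ===== VERDICT (by name: the statement is the Claim_ definition above) =====
theorem word_split_spec : Claim_equal_word_split := by
  intro word _
  unfold Spec_word_split word_split word_split_alt
  simp only [wsLoopA_eq_findall, List.drop_zero]
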